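-- pv_equiv track=rewrite | github.com/Ic4r0/advent_of_code2023 | days/day_4.py | part_1
-- ===== SOURCE A (Python) =====
-- def check_row_column(board: list, drawn_numbers: list) -> bool:
--     complete_line = False
--     for row in board:
--         if all(number in drawn_numbers for number in row):
--             complete_line = True
--             break
--     if not complete_line:
--         for column_idx in range(5):
--             column = [row[column_idx] for row in board]
--             if all(number in drawn_numbers for number in column):
--                 complete_line = True
--                 break
--     return complete_line
--
-- def part_1(draws_list: list, boards_dict: dict) -> int:
--     """ Code for the 1st part of the 4th day of Advent of Code
--
--     :param draws_list: draws list
--     :param boards_dict: dict containing all boards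
--     :return: numeric result
--     """
--     drawn = []
--     bingo = False
--     bingo_board = []
--     for draw in draws_list:
--         drawn.append(draw)
--         for board_idx in boards_dict:
--             bingo = check_row_column(boards_dict.get(board_idx), drawn)
--             if bingo:
--                 bingo_board = boards_dict.get(board_idx)
--                 break
--         if bingo:
--             break
--
--     return (sum(sum([elem for elem in row if elem not in drawn]) for row in bingo_board)) * drawn[-1]
-- ===== SOURCE B (Python) =====
-- def part_1(draws_list: list, boards_dict: dict) -> int:
--     """Precompute each number's first draw index, derive every board's earliest
--     winning draw index directly (a missing cell of a short row can never be
--     marked), and pick the first board with the minimal winning index."""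
--     pos = {}
--     i = 0
--     for d in draws_list:
--         if d not in pos:
--             pos[d] = i
--         i += 1
--     inf = len(draws_list)
--
--     def line_time(line):
--         t = 0
--         for n in line:
--             p = pos.get(n, inf)
--             if p > t:
--                 t = p
--         return t
--
--     def column_time(board, c):
--         t = 0
--         for row in board:
--             p = pos.get(row[c], inf) if c < len(row) else inf
--             if p > t:
--                 t = p
--         return t
--
--     def board_time(board):
--         w = inf
--         for row in board:
--             t = line_time(row)
--             if t < w:
--                 w = t
--         for c in range(5):
--             t = column_time(board, c)
--             if t < w:
--                 w = t
--         return w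
--
--     best_w = inf
--     best_board = None
--     for board in boards_dict.values():
--         w = board_time(board)
--         if w < best_w:
--             best_w = w
--             best_board = board
--
--     if best_board is None:
--         return 0
--     unmarked = sum(sum(n for n in row if pos.get(n, inf) > best_w) for row in best_board)
--     return unmarked * draws_list[best_w]
-- ===== Notes on version B (the rewrite author's own statement) =====
-- stated objective: alternative
-- what changed: Instead of re-simulating the bingo game draw by draw and re-scanning every board's rows and columns against the growing drawn list, B precomputes each number's first draw index in one pass, derives every board's earliest winning draw index directly from those indices, and picks the first board attaining the minimal index.
import Mathlib
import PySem

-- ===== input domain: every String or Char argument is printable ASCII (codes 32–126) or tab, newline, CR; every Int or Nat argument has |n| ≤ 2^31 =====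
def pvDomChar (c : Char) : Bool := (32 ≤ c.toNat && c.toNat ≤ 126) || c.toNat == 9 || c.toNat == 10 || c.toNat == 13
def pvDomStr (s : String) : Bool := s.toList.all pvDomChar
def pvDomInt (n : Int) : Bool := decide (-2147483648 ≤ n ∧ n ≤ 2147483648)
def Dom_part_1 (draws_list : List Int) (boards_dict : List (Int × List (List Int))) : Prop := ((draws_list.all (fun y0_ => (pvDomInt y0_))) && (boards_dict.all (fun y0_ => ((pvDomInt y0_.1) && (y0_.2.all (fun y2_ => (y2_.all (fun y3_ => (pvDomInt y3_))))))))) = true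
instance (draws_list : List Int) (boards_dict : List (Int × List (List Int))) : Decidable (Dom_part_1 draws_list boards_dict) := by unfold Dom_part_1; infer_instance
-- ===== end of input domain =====

-- B replaces A's draw-by-draw re-simulation by a single pass computing each number's first
-- draw index and each board's earliest winning index (objective: alternative algorithm).
-- ===== PORT A =====
def checkRowColumn (board : List (List Int)) (drawn_numbers : List Int) : Bool :=
  let rowC := board.any (fun row => row.all (fun n => drawn_numbers.contains n))
  if rowC then true
  else (PySem.List.pyRange 0 5 1).any (fun c =>
    (board.map (fun row => PySem.List.pyGetD row c 0)).all (fun n => drawn_numbers.contains n))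

def part1Find (d : PySem.Dict Int (List (List Int))) (drawn : List Int) :
    Option (List (List Int)) :=
  match d.keys.find? (fun k => checkRowColumn ((d.get? k).getD []) drawn) with
  | some k => some ((d.get? k).getD [])
  | none => none

def part1Loop (d : PySem.Dict Int (List (List Int))) :
    List Int → List Int → List Int × List (List Int)
  | drawn, [] => (drawn, [])
  | drawn, dr :: rest =>
    match part1Find d (drawn ++ [dr]) with
    | some b => (drawn ++ [dr], b)
    | none => part1Loop d (drawn ++ [dr]) rest

def part_1 (draws_list : List Int) (boards_dict : List (Int × List (List Int))) : Int :=
  let d := PySem.Dict.mk boards_dict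
  let res := part1Loop d [] draws_list
  ((res.2.map (fun row => (row.filter (fun e => !res.1.contains e)).sum)).sum) *
    PySem.List.pyGetD res.1 (-1) 0

-- ===== PORT B =====
def buildPos (draws_list : List Int) : PySem.Dict Int Int :=
  (draws_list.foldl
    (fun (st : PySem.Dict Int Int × Int) dr =>
      ((if st.1.contains dr then st.1 else st.1.insert dr st.2), st.2 + 1))
    (PySem.Dict.empty, 0)).1

def lineTime (pos : PySem.Dict Int Int) (inf : Int) (line : List Int) : Int :=
  line.foldl (fun t n => let p := pos.getD n inf; if p > t then p else t) 0

def colTime (pos : PySem.Dict Int Int) (inf : Int) (board : List (List Int)) (c : Int) : Int :=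
  board.foldl
    (fun t row =>
      let p := if c < PySem.List.len row then pos.getD (PySem.List.pyGetD row c 0) inf else inf
      if p > t then p else t) 0

def boardTime (pos : PySem.Dict Int Int) (inf : Int) (board : List (List Int)) : Int :=
  let w := board.foldl
    (fun w row => let t := lineTime pos inf row; if t < w then t else w) inf
  (PySem.List.pyRange 0 5 1).foldl
    (fun w c =>
      let t := colTime pos inf board c
      if t < w then t else w) w

def part_1_alt (draws_list : List Int) (boards_dict : List (Int × List (List Int))) : Int :=
  let pos := buildPos draws_list
  let inf : Int := draws_list.length
  let best := ((PySem.Dict.mk boards_dict).values).foldl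
    (fun (st : Int × Option (List (List Int))) board =>
      let w := boardTime pos inf board
      if w < st.1 then (w, some board) else st) (inf, none)
  match best.2 with
  | none => 0
  | some b =>
    ((b.map (fun row => (row.filter (fun n => pos.getD n inf > best.1)).sum)).sum) *
      PySem.List.pyGetD draws_list best.1 0

-- ===== PRECONDITION & SPEC =====
-- board completes on the very first draw via a row (every entry equal to the first draw,
-- incl. an empty row) or via one of the first five columns (reachable: every row long enough)
def rowInst (v : List (List Int)) (d0 : Int) : Prop := ∃ row ∈ v, ∀ n ∈ row, n = d0
def colInst (v : List (List Int)) (d0 : Int) : Prop := ∃ c < 5, ∀ row ∈ v, row[c]? = some d0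
def instWin (v : List (List Int)) (d0 : Int) : Prop := rowInst v d0 ∨ colInst v d0
-- Pre_ excludes exactly: empty draws_list (A raises IndexError on drawn[-1]); boards with a
-- row shorter than 5 unless the game provably ends on the first draw before A's column check
-- reaches a short row (otherwise A raises IndexError on row[column_idx]); and duplicate board
-- keys, which no real Python dict can present to A.
def Pre_part_1 (draws_list : List Int) (boards_dict : List (Int × List (List Int))) : Prop :=
  draws_list ≠ [] ∧ (boards_dict.map Prod.fst).Nodup ∧
    ∀ i : Nat, ∀ _hi : i < boards_dict.length,
      (∃ row ∈ boards_dict[i].2, row.length < 5) →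
        (instWin boards_dict[i].2 draws_list.headI ∨
          ∃ kv ∈ boards_dict.take i, instWin kv.2 draws_list.headI)
instance (draws_list : List Int) (boards_dict : List (Int × List (List Int))) : Decidable (Pre_part_1 draws_list boards_dict) := by unfold Pre_part_1 instWin rowInst colInst; infer_instance

def pvWitness_part_1 : List Int × (List (Int × List (List Int))) :=
  ([7, 4, 9, 5, 11],
   [(0, [[22, 13, 17, 11, 0], [8, 2, 23, 4, 24], [21, 9, 14, 16, 7],
         [6, 10, 3, 18, 5], [1, 12, 20, 15, 19]])])

def Spec_part_1 (draws_list : List Int) (boards_dict : List (Int × List (List Int))) (out : Int) : Prop := out = part_1_alt draws_list boards_dict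
instance (draws_list : List Int) (boards_dict : List (Int × List (List Int))) (out : Int) : Decidable (Spec_part_1 draws_list boards_dict out) := by unfold Spec_part_1; infer_instance

-- ===== CLAIM (what is proved, stated in full; the proofs are below) =====
def Claim_equal_part_1 : Prop := ∀ (draws_list : List Int) (boards_dict : List (Int × List (List Int))), Dom_part_1 draws_list boards_dict → Pre_part_1 draws_list boards_dict → Spec_part_1 draws_list boards_dict (part_1 draws_list boards_dict)

-- ===== LEMMAS AND PROOFS =====

-- first index of n in l (as an Int), proof-side helper
def fIdx : List Int → Int → Option Int
  | [], _ => none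
  | x :: l, n => if x = n then some 0 else (fIdx l n).map (· + 1)

theorem fIdx_nonneg {l : List Int} {n j : Int} (h : fIdx l n = some j) : 0 ≤ j := by
  induction l generalizing j with
  | nil => simp [fIdx] at h
  | cons x t ih =>
    by_cases hx : x = n
    · simp [fIdx, hx] at h; omega
    · simp [fIdx, hx] at h
      obtain ⟨j', hj', rfl⟩ := h
      have := ih hj'; omega

theorem mem_take_iff_fIdx (l : List Int) (k : Nat) (n : Int) :
    n ∈ l.take (k + 1) ↔ ∃ j, fIdx l n = some j ∧ j ≤ (k : Int) := by
  induction l generalizing k with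
  | nil => simp [fIdx]
  | cons x t ih =>
    by_cases hx : x = n
    · subst hx
      constructor
      · intro _; exact ⟨0, by simp [fIdx], by positivity⟩
      · intro _; exact List.mem_cons_self
    · have hne : ¬ n = x := fun h => hx h.symm
      simp only [List.take_succ_cons, List.mem_cons, fIdx, if_neg hx]
      cases k with
      | zero =>
        simp only [List.take_zero, List.not_mem_nil, or_false]
        constructor
        · intro h; exact absurd h hne
        · rintro ⟨j, hj, hle⟩
          simp only [Option.map_eq_some_iff] at hj
          obtain ⟨j', hj', rfl⟩ := hj
          have := fIdx_nonneg hj'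
          omega
      | succ k' =>
        rw [eq_false hne, false_or, ih k']
        constructor
        · rintro ⟨j, hj, hle⟩
          refine ⟨j + 1, by simp [hj], by push_cast; omega⟩
        · rintro ⟨j, hj, hle⟩
          simp only [Option.map_eq_some_iff] at hj
          obtain ⟨j', hj', rfl⟩ := hj
          refine ⟨j', hj', by push_cast at hle; omega⟩

theorem buildPos_get? (l : List Int) (i0 : Int) (d0 : PySem.Dict Int Int) (n : Int) :
    ((l.foldl
      (fun (st : PySem.Dict Int Int × Int) dr =>
        ((if st.1.contains dr then st.1 else st.1.insert dr st.2), st.2 + 1))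
      (d0, i0)).1).get? n
    = match d0.get? n with
      | some v => some v
      | none => (fIdx l n).map (fun j => i0 + j) := by
  induction l generalizing i0 d0 with
  | nil => cases h : d0.get? n <;> simp [fIdx, h]
  | cons x t ih =>
    rw [List.foldl_cons, ih]
    by_cases hx : n = x
    · subst hx
      by_cases hc : d0.contains n = true
      · rw [if_pos hc]
        have hs : (d0.get? n).isSome := by
          rw [← PySem.Dict.contains_eq_isSome_get?]; exact hc
        obtain ⟨v, hv⟩ := Option.isSome_iff_exists.mp hs
        simp [hv]
      · rw [if_neg hc]
        have hnone : d0.get? n = none := by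
          cases h : d0.get? n with
          | none => rfl
          | some v =>
            exfalso; apply hc
            rw [PySem.Dict.contains_eq_isSome_get?, h]; rfl
        rw [PySem.Dict.get?_insert]
        simp [hnone, fIdx]
    · have hrw : (if d0.contains x = true then d0 else d0.insert x i0).get? n = d0.get? n := by
        split
        · rfl
        · rw [PySem.Dict.get?_insert, if_neg hx]
      rw [hrw]
      cases hgn : d0.get? n with
      | some v => rfl
      | none =>
        have hxn : ¬ x = n := fun h => hx h.symm
        simp only [fIdx, if_neg hxn, Option.map_map]
        cases fIdx t n with
        | none => rfl
        | some j => simp [Function.comp]; omega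

theorem pg_le_iff (draws : List Int) (k : Nat) (hk : k < draws.length) (n : Int) :
    ((buildPos draws).getD n (draws.length : Int) ≤ (k : Int)) ↔ n ∈ draws.take (k + 1) := by
  rw [PySem.Dict.getD_eq_get?_getD]
  unfold buildPos
  rw [buildPos_get? draws 0 PySem.Dict.empty n]
  rw [PySem.Dict.get?_empty]
  rw [mem_take_iff_fIdx]
  cases hf : fIdx draws n with
  | none =>
    simp only [Option.map_none, Option.getD_none]
    constructor
    · intro h; exfalso; omega
    · rintro ⟨j, hj, _⟩; cases hj
  | some j =>
    simp only [Option.map_some, Option.getD_some]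
    constructor
    · intro h; exact ⟨j, rfl, by omega⟩
    · rintro ⟨j', hj', hle⟩
      cases hj'; omega

theorem foldl_max_le_iff {α : Type} (l : List α) (f : α → Int) (a c : Int) :
    l.foldl (fun t n => let p := f n; if p > t then p else t) a ≤ c ↔
      a ≤ c ∧ ∀ n ∈ l, f n ≤ c := by
  induction l generalizing a with
  | nil => simp
  | cons x t ih =>
    simp only [List.foldl_cons, ih, List.mem_cons]
    constructor
    · rintro ⟨h1, h2⟩
      have hx : f x ≤ c ∧ a ≤ c := by split at h1 <;> constructor <;> omega
      refine ⟨hx.2, ?_⟩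
      rintro m (rfl | hm)
      · exact hx.1
      · exact h2 m hm
    · rintro ⟨h1, h2⟩
      refine ⟨?_, fun m hm => h2 m (Or.inr hm)⟩
      have := h2 x (Or.inl rfl)
      split <;> omega

theorem foldl_min_le_iff {α : Type} (l : List α) (f : α → Int) (a c : Int) :
    l.foldl (fun w n => let t := f n; if t < w then t else w) a ≤ c ↔
      a ≤ c ∨ ∃ n ∈ l, f n ≤ c := by
  induction l generalizing a with
  | nil => simp
  | cons x t ih =>
    simp only [List.foldl_cons, ih, List.mem_cons]
    constructor
    · rintro (h1 | ⟨m, hm, hle⟩)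
      · split at h1
        · exact Or.inr ⟨x, Or.inl rfl, by omega⟩
        · exact Or.inl h1
      · exact Or.inr ⟨m, Or.inr hm, hle⟩
    · rintro (h1 | ⟨m, hm, hle⟩)
      · exact Or.inl (by split <;> omega)
      · rcases hm with rfl | hm
        · exact Or.inl (by split <;> omega)
        · exact Or.inr ⟨m, hm, hle⟩

theorem lineTime_le_iff (pos : PySem.Dict Int Int) (inf : Int) (line : List Int) (c : Int)
    (hc : 0 ≤ c) :
    (lineTime pos inf line ≤ c) ↔ ∀ n ∈ line, pos.getD n inf ≤ c := by
  unfold lineTime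
  rw [foldl_max_le_iff]
  simp [hc]

-- checkRowColumn agrees with boardTime: the board is complete after draws 0..k exactly
-- when its boardTime is at most k
theorem check_iff_boardTime (draws : List Int) (board : List (List Int))
    (hrows : ∀ row ∈ board, 5 ≤ row.length) (k : Nat) (hk : k < draws.length) :
    checkRowColumn board (draws.take (k + 1)) = true ↔
      boardTime (buildPos draws) (draws.length : Int) board ≤ (k : Int) := by
  have hc0 : (0:Int) ≤ (k:Int) := by positivity
  have hline : ∀ line : List Int,
      (lineTime (buildPos draws) (draws.length : Int) line ≤ (k : Int)) ↔
        line.all (fun n => (draws.take (k+1)).contains n) = true := by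
    intro line
    rw [lineTime_le_iff _ _ _ _ hc0]
    simp only [List.all_eq_true, List.contains_iff_mem]
    constructor
    · intro h n hn; exact (pg_le_iff draws k hk n).mp (h n hn)
    · intro h n hn; exact (pg_le_iff draws k hk n).mpr (h n hn)
  have hcol : ∀ c : Int, c ∈ PySem.List.pyRange 0 5 1 →
      ((colTime (buildPos draws) (draws.length : Int) board c ≤ (k : Int)) ↔
        (board.map (fun row => PySem.List.pyGetD row c 0)).all
          (fun n => (draws.take (k+1)).contains n) = true) := by
    intro c hc
    have hc5 := (PySem.List.mem_pyRange_one).mp hc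
    have hlen : ∀ row ∈ board, c < PySem.List.len row := by
      intro row hrow
      rw [PySem.List.len_eq]
      have h5 := hrows row hrow
      have : (5:Int) ≤ (row.length : Int) := by exact_mod_cast h5
      omega
    unfold colTime
    rw [foldl_max_le_iff]
    simp only [List.all_map, List.all_eq_true, Function.comp, List.contains_iff_mem]
    constructor
    · rintro ⟨-, h⟩ row hrow
      have hr := h row hrow
      rw [if_pos (hlen row hrow)] at hr
      exact (pg_le_iff draws k hk _).mp hr
    · intro h
      refine ⟨hc0, fun row hrow => ?_⟩
      rw [if_pos (hlen row hrow)]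
      exact (pg_le_iff draws k hk _).mpr (h row hrow)
  have hrw : checkRowColumn board (draws.take (k + 1)) = true ↔
      ((∃ row ∈ board, row.all (fun n => (draws.take (k+1)).contains n) = true) ∨
       (∃ c ∈ PySem.List.pyRange 0 5 1,
          (board.map (fun row => PySem.List.pyGetD row c 0)).all
            (fun n => (draws.take (k+1)).contains n) = true)) := by
    unfold checkRowColumn
    by_cases hrow : board.any (fun row => row.all fun n => (draws.take (k+1)).contains n) = true
    · rw [if_pos hrow]
      simp only [List.any_eq_true] at hrow
      exact ⟨fun _ => Or.inl hrow, fun _ => rfl⟩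
    · rw [if_neg hrow]
      simp only [List.any_eq_true] at hrow ⊢
      constructor
      · exact Or.inr
      · rintro (h | h)
        · exact absurd h hrow
        · exact h
  rw [hrw]
  unfold boardTime
  rw [foldl_min_le_iff, foldl_min_le_iff]
  constructor
  · rintro (h | ⟨c, hc, hall⟩)
    · exact Or.inl (Or.inr (by
        obtain ⟨row, hmem, hall⟩ := h
        exact ⟨row, hmem, (hline row).mpr hall⟩))
    · exact Or.inr ⟨c, hc, (hcol c hc).mpr hall⟩
  · rintro (h | ⟨c, hc, hle⟩)
    · rcases h with h | ⟨row, hmem, hle⟩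
      · exfalso; omega
      · exact Or.inl ⟨row, hmem, (hline row).mp hle⟩
    · exact Or.inr ⟨c, hc, (hcol c hc).mp hle⟩

-- min-fold helpers for the board-selection loop
theorem le_foldl_min_iff {α : Type} (l : List α) (f : α → Int) (a c : Int) :
    c ≤ l.foldl (fun w b => min w (f b)) a ↔ c ≤ a ∧ ∀ b ∈ l, c ≤ f b := by
  induction l generalizing a with
  | nil => simp
  | cons x t ih =>
    simp only [List.foldl_cons, ih, List.mem_cons]
    constructor
    · rintro ⟨h1, h2⟩
      refine ⟨by omega, ?_⟩
      rintro b (rfl | hb)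
      · omega
      · exact h2 b hb
    · rintro ⟨h1, h2⟩
      exact ⟨by have := h2 x (Or.inl rfl); omega, fun b hb => h2 b (Or.inr hb)⟩

theorem mfold_le_init {α : Type} (l : List α) (f : α → Int) (a : Int) :
    l.foldl (fun w b => min w (f b)) a ≤ a := by
  induction l generalizing a with
  | nil => simp
  | cons x t ih => exact le_trans (ih (min a (f x))) (by omega)

theorem mfold_le_elem {α : Type} (l : List α) (f : α → Int) (a : Int) :
    ∀ b ∈ l, l.foldl (fun w b => min w (f b)) a ≤ f b := by
  induction l generalizing a with
  | nil => simp
  | cons x t ih =>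
    intro b hb
    rw [List.foldl_cons]
    rcases List.mem_cons.mp hb with rfl | hb
    · exact le_trans (mfold_le_init t f _) (by omega)
    · exact ih _ b hb

theorem mfold_eq_init_or_mem {α : Type} (l : List α) (f : α → Int) (a : Int) :
    l.foldl (fun w b => min w (f b)) a = a ∨
      ∃ b ∈ l, l.foldl (fun w b => min w (f b)) a = f b := by
  induction l generalizing a with
  | nil => exact Or.inl rfl
  | cons x t ih =>
    rw [List.foldl_cons]
    rcases ih (min a (f x)) with h | ⟨b, hb, hbeq⟩
    · rcases le_or_gt a (f x) with hle | hlt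
      · exact Or.inl (by rw [h]; omega)
      · exact Or.inr ⟨x, List.mem_cons_self, by rw [h]; omega⟩
    · exact Or.inr ⟨b, List.mem_cons_of_mem x hb, hbeq⟩

theorem bestFoldl_fst {α : Type} (f : α → Int) (l : List α) (w0 : Int) (b0 : Option α) :
    (l.foldl (fun st b => let w := f b; if w < st.1 then (w, some b) else st) (w0, b0)).1
      = l.foldl (fun w b => min w (f b)) w0 := by
  induction l generalizing w0 b0 with
  | nil => rfl
  | cons x t ih =>
    simp only [List.foldl_cons]
    split
    · rw [ih]; congr 1; omega
    · rw [ih]; congr 1; omega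

theorem bestFoldl_snd {α : Type} (f : α → Int) (l : List α) (w0 : Int) (b0 : Option α) :
    (l.foldl (fun st b => let w := f b; if w < st.1 then (w, some b) else st) (w0, b0)).2
      = if l.foldl (fun w b => min w (f b)) w0 < w0 then
          l.find? (fun b => decide (f b ≤ l.foldl (fun w b => min w (f b)) w0))
        else b0 := by
  induction l generalizing w0 b0 with
  | nil => simp
  | cons x t ih =>
    simp only [List.foldl_cons]
    have hmin_le : t.foldl (fun w b => min w (f b)) (min w0 (f x)) ≤ min w0 (f x) :=
      mfold_le_init t f _
    split
    · rename_i hlt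
      rw [ih]
      have hmw : min w0 (f x) = f x := by omega
      simp only [hmw] at hmin_le ⊢
      have hcond : t.foldl (fun w b => min w (f b)) (f x) < w0 := by omega
      rw [if_pos hcond]
      by_cases hstrict : t.foldl (fun w b => min w (f b)) (f x) < f x
      · rw [if_pos hstrict,
           List.find?_cons_of_neg (by simp; omega)]
      · rw [if_neg hstrict,
           List.find?_cons_of_pos (by simp; omega)]
    · rename_i hge
      rw [ih]
      have hmw : min w0 (f x) = w0 := by omega
      simp only [hmw] at hmin_le ⊢
      by_cases hcond : t.foldl (fun w b => min w (f b)) w0 < w0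
      · rw [if_pos hcond, if_pos hcond,
           List.find?_cons_of_neg (by simp; omega)]
      · rw [if_neg hcond, if_neg hcond]

theorem find?_congr_mem {α : Type} {p q : α → Bool} :
    ∀ l : List α, (∀ x ∈ l, p x = q x) → l.find? p = l.find? q := by
  intro l
  induction l with
  | nil => intro _; rfl
  | cons x t ih =>
    intro h
    cases hp : p x with
    | true =>
      rw [List.find?_cons_of_pos hp, List.find?_cons_of_pos (by rw [← h x List.mem_cons_self]; exact hp)]
    | false =>
      rw [List.find?_cons_of_neg (by simp [hp]), List.find?_cons_of_neg (by simp [← h x List.mem_cons_self, hp]),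
        ih (fun y hy => h y (List.mem_cons_of_mem x hy))]

-- A's key-iteration with dict lookup equals a direct scan of the (key, board) pairs
theorem part1Find_eq (boards : List (Int × List (List Int)))
    (hnd : (boards.map Prod.fst).Nodup) (drawn : List Int) :
    part1Find (PySem.Dict.mk boards) drawn
      = (boards.find? (fun kv => checkRowColumn kv.2 drawn)).map Prod.snd := by
  induction boards with
  | nil => rfl
  | cons kv rest ih =>
    obtain ⟨k, v⟩ := kv
    simp only [List.map_cons, List.nodup_cons] at hnd
    obtain ⟨hknotin, hndrest⟩ := hnd
    have hget : (PySem.Dict.mk ((k, v) :: rest)).get? k = some v := by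
      rw [PySem.Dict.get?_mk_cons]; simp
    have hgetne : ∀ k', k' ≠ k →
        (PySem.Dict.mk ((k, v) :: rest)).get? k' = (PySem.Dict.mk rest).get? k' := by
      intro k' hne
      rw [PySem.Dict.get?_mk_cons]
      simp [show ¬ k = k' from fun h => hne h.symm]
    unfold part1Find
    rw [PySem.Dict.keys_mk]
    simp only [List.map_cons]
    by_cases hchk : checkRowColumn v drawn = true
    · rw [List.find?_cons_of_pos (by rw [hget]; simpa using hchk)]
      rw [List.find?_cons_of_pos (by simpa using hchk)]
      simp [hget]
    · rw [List.find?_cons_of_neg (by rw [hget]; simpa using hchk)]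
      rw [List.find?_cons_of_neg (by simpa using hchk)]
      have hcongr : (rest.map Prod.fst).find?
            (fun k' => checkRowColumn (((PySem.Dict.mk ((k, v) :: rest)).get? k').getD []) drawn)
          = (rest.map Prod.fst).find?
            (fun k' => checkRowColumn (((PySem.Dict.mk rest).get? k').getD []) drawn) := by
        apply find?_congr_mem
        intro k' hk'
        rw [hgetne k' (fun h => hknotin (h ▸ hk'))]
      rw [hcongr]
      have := ih hndrest
      unfold part1Find at this
      rw [PySem.Dict.keys_mk] at this
      cases hfind : (rest.map Prod.fst).find?
          (fun k' => checkRowColumn (((PySem.Dict.mk rest).get? k').getD []) drawn) with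
      | none => rw [hfind] at this; simpa using this
      | some kf =>
        rw [hfind] at this
        have hkfmem : kf ∈ rest.map Prod.fst := List.mem_of_find?_eq_some hfind
        dsimp only at this ⊢
        rw [hgetne kf (fun h => hknotin (h ▸ hkfmem))]
        simpa using this

-- the main-loop lemmas
theorem loop_none (d : PySem.Dict Int (List (List Int))) :
    ∀ (l pre : List Int),
      (∀ j : Nat, j < l.length → part1Find d (pre ++ l.take (j + 1)) = none) →
      part1Loop d pre l = (pre ++ l, []) := by
  intro l
  induction l with
  | nil => intro pre _; simp [part1Loop]
  | cons x t ih =>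
    intro pre h
    have h0 := h 0 (by simp)
    simp only [List.take_succ_cons, List.take_zero] at h0
    unfold part1Loop
    rw [h0]
    have := ih (pre ++ [x]) (fun j hj => by
      have := h (j + 1) (by simpa using Nat.succ_lt_succ hj)
      simpa [List.append_assoc] using this)
    rw [this]
    simp

theorem loop_reach (d : PySem.Dict Int (List (List Int))) (draws : List Int) (W : Nat)
    (bstar : List (List Int)) (hW : W < draws.length)
    (hnone : ∀ k : Nat, k < W → part1Find d (draws.take (k + 1)) = none)
    (hsome : part1Find d (draws.take (W + 1)) = some bstar) :
    part1Loop d [] draws = (draws.take (W + 1), bstar) := by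
  suffices h : ∀ n k : Nat, k + n = W → part1Loop d (draws.take k) (draws.drop k)
      = (draws.take (W + 1), bstar) by
    have := h W 0 (by omega)
    simpa using this
  intro n
  induction n with
  | zero =>
    intro k hk
    have hkW : k = W := by omega
    subst hkW
    rw [List.drop_eq_getElem_cons hW]
    unfold part1Loop
    have htake : draws.take k ++ [draws[k]] = draws.take (k + 1) := by
      rw [List.take_add_one, List.getElem?_eq_getElem hW]; rfl
    rw [htake, hsome]
  | succ n ih =>
    intro k hk
    have hkW : k < W := by omega
    have hklen : k < draws.length := by omega
    rw [List.drop_eq_getElem_cons hklen]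
    unfold part1Loop
    have htake : draws.take k ++ [draws[k]] = draws.take (k + 1) := by
      rw [List.take_add_one, List.getElem?_eq_getElem hklen]; rfl
    rw [htake, hnone k hkW]
    exact ih (k + 1) (by omega)

theorem le_foldl_min_iff' {α : Type} (l : List α) (f : α → Int) (a c : Int) :
    c ≤ l.foldl (fun w n => let t := f n; if t < w then t else w) a ↔
      c ≤ a ∧ ∀ b ∈ l, c ≤ f b := by
  induction l generalizing a with
  | nil => simp
  | cons x t ih =>
    simp only [List.foldl_cons, ih, List.mem_cons]
    constructor
    · rintro ⟨h1, h2⟩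
      have hx : c ≤ a ∧ c ≤ f x := by split at h1 <;> constructor <;> omega
      refine ⟨hx.1, ?_⟩
      rintro b (rfl | hb)
      · exact hx.2
      · exact h2 b hb
    · rintro ⟨h1, h2⟩
      refine ⟨?_, fun b hb => h2 b (Or.inr hb)⟩
      have := h2 x (Or.inl rfl)
      split <;> omega

-- nonnegativity of the computed times
theorem le_foldl_max_init {α : Type} (l : List α) (f : α → Int) (a : Int) :
    a ≤ l.foldl (fun t n => let p := f n; if p > t then p else t) a := by
  induction l generalizing a with
  | nil => simp
  | cons x t ih =>
    rw [List.foldl_cons]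
    exact le_trans (by dsimp only; split <;> omega) (ih _)

theorem boardTime_nonneg (pos : PySem.Dict Int Int) (inf : Int) (hinf : 0 ≤ inf)
    (board : List (List Int)) : 0 ≤ boardTime pos inf board := by
  unfold boardTime
  rw [le_foldl_min_iff']
  refine ⟨?_, fun c _ => le_foldl_max_init _ _ _⟩
  rw [le_foldl_min_iff']
  exact ⟨hinf, fun row _ => le_foldl_max_init _ _ _⟩

theorem mem_take_one (draws : List Int) (h : draws ≠ []) (n : Int) :
    n ∈ draws.take 1 ↔ n = draws.headI := by
  cases draws with
  | nil => exact absurd rfl h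
  | cons d t => simp

theorem pg_zero_iff (draws : List Int) (h : draws ≠ []) (n : Int) :
    ((buildPos draws).getD n (draws.length : Int) ≤ 0) ↔ n = draws.headI := by
  have hlen : 0 < draws.length := List.length_pos_iff.mpr h
  have := pg_le_iff draws 0 hlen n
  simp only [Nat.cast_zero] at this
  rw [this, mem_take_one draws h]

theorem instWin_boardTime (draws : List Int) (h : draws ≠ []) (v : List (List Int))
    (hw : instWin v draws.headI) :
    boardTime (buildPos draws) (draws.length : Int) v ≤ 0 := by
  unfold boardTime
  rcases hw with ⟨row, hrow, hall⟩ | ⟨c, hc5, hall⟩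
  · rw [foldl_min_le_iff]
    refine Or.inl ((foldl_min_le_iff _ _ _ _).mpr (Or.inr ⟨row, hrow, ?_⟩))
    unfold lineTime
    rw [foldl_max_le_iff]
    exact ⟨le_refl 0, fun n hn => (pg_zero_iff draws h n).mpr (hall n hn)⟩
  · rw [foldl_min_le_iff]
    refine Or.inr ⟨(c : Int), ?_, ?_⟩
    · rw [PySem.List.mem_pyRange_one]
      constructor
      · positivity
      · exact_mod_cast hc5
    · unfold colTime
      rw [foldl_max_le_iff]
      refine ⟨le_refl 0, fun row hrow => ?_⟩
      have hsome := hall row hrow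
      have hclen : c < row.length := by
        by_contra hge
        rw [List.getElem?_eq_none_iff.mpr (by omega)] at hsome
        cases hsome
      have hlen : (c : Int) < PySem.List.len row := by
        rw [PySem.List.len_eq]; exact_mod_cast hclen
      rw [if_pos hlen]
      have hval : PySem.List.pyGetD row (c : Int) 0 = draws.headI := by
        rw [PySem.List.pyGetD_natCast, List.getD_eq_getElem?_getD, hsome]
        rfl
      rw [hval]
      exact (pg_zero_iff draws h _).mpr rfl

theorem boardTime_check (draws : List Int) (h : draws ≠ []) (v : List (List Int))
    (hbt : boardTime (buildPos draws) (draws.length : Int) v ≤ 0) :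
    checkRowColumn v (draws.take 1) = true := by
  have hlen : (0:Int) < (draws.length : Int) := by
    exact_mod_cast List.length_pos_iff.mpr h
  unfold boardTime at hbt
  rw [foldl_min_le_iff, foldl_min_le_iff] at hbt
  have hmem : ∀ n : Int, ((buildPos draws).getD n (draws.length : Int) ≤ 0) →
      (draws.take 1).contains n = true := by
    intro n hn
    rw [List.contains_iff_mem, mem_take_one draws h]
    exact (pg_zero_iff draws h n).mp hn
  unfold checkRowColumn
  rcases hbt with (h1 | ⟨row, hrow, hlt⟩) | ⟨c, hc, hct⟩
  · omega
  · have : v.any (fun row => row.all fun n => (draws.take 1).contains n) = true := by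
      rw [List.any_eq_true]
      refine ⟨row, hrow, ?_⟩
      rw [List.all_eq_true]
      intro n hn
      unfold lineTime at hlt
      rw [foldl_max_le_iff] at hlt
      exact hmem n (hlt.2 n hn)
    rw [if_pos this]
  · have hcol : (v.map (fun row => PySem.List.pyGetD row c 0)).all
        (fun n => (draws.take 1).contains n) = true := by
      simp only [List.all_map, List.all_eq_true, Function.comp]
      intro row hrow
      unfold colTime at hct
      rw [foldl_max_le_iff] at hct
      have := hct.2 row hrow
      split at this
      · exact hmem _ this
      · omega
    by_cases hrowc : v.any (fun row => row.all fun n => (draws.take 1).contains n) = true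
    · rw [if_pos hrowc]
    · rw [if_neg hrowc, List.any_eq_true]
      exact ⟨c, hc, hcol⟩

theorem find?_eq_cover {α : Type} {p q : α → Bool} :
    ∀ l : List α, (∀ x ∈ l, q x = true → p x = true) →
      (∀ i : Nat, ∀ hi : i < l.length, p l[i] = true →
        q l[i] = true ∨ ∃ x ∈ l.take i, q x = true) →
      l.find? p = l.find? q := by
  intro l
  induction l with
  | nil => intro _ _; rfl
  | cons x t ih =>
    intro hqp hcov
    cases hq : q x with
    | true =>
      rw [List.find?_cons_of_pos (hqp x List.mem_cons_self hq), List.find?_cons_of_pos hq]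
    | false =>
      have hp : p x = false := by
        cases hpx : p x with
        | false => rfl
        | true =>
          rcases hcov 0 (by simp) (by simpa using hpx) with h | ⟨y, hy, _⟩
          · simp only [List.getElem_cons_zero] at h
            rw [h] at hq; cases hq
          · simp at hy
      rw [List.find?_cons_of_neg (by simp [hp]), List.find?_cons_of_neg (by simp [hq])]
      apply ih
      · intro y hy; exact hqp y (List.mem_cons_of_mem x hy)
      · intro i hi hpi
        rcases hcov (i + 1) (by simpa using Nat.succ_lt_succ hi)
            (by simpa using hpi) with h | ⟨y, hy, hyq⟩
        · exact Or.inl (by simpa using h)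
        · rw [List.take_succ_cons] at hy
          rcases List.mem_cons.mp hy with rfl | hy
          · rw [hq] at hyq; cases hyq
          · exact Or.inr ⟨y, hy, hyq⟩

-- ===== VERDICT (by name: the statement is the Claim_ definition above) =====
theorem part_1_spec : Claim_equal_part_1 := by
  intro draws boards _hdom hpre
  obtain ⟨hne, hnd, hcov⟩ := hpre
  unfold Spec_part_1 part_1 part_1_alt
  dsimp only
  rw [PySem.Dict.values_mk, bestFoldl_fst, bestFoldl_snd]
  by_cases hallrag : ∀ kv ∈ boards, ∀ row ∈ kv.2, 5 ≤ row.length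
  · by_cases hcase :
        (boards.map Prod.snd).foldl
          (fun w b => min w (boardTime (buildPos draws) (draws.length : Int) b))
          (draws.length : Int) < (draws.length : Int)
    · -- some board wins: both sides select the first board with the minimal winning index
      have h0m : (0:Int) ≤ (boards.map Prod.snd).foldl
          (fun w b => min w (boardTime (buildPos draws) (draws.length : Int) b))
          (draws.length : Int) := by
        refine (le_foldl_min_iff _ _ _ _).mpr ⟨by positivity, fun b _ => ?_⟩
        exact boardTime_nonneg _ _ (by positivity) b
      -- names for the minimal index
      generalize hM : (boards.map Prod.snd).foldl
          (fun w b => min w (boardTime (buildPos draws) (draws.length : Int) b))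
          (draws.length : Int) = M at hcase h0m
      have hWlt : M.toNat < draws.length := by omega
      have hMcast : ((M.toNat : Nat) : Int) = M := Int.toNat_of_nonneg h0m
      have hex : M = (draws.length : Int) ∨
          ∃ b ∈ boards.map Prod.snd, M = boardTime (buildPos draws) (draws.length : Int) b := by
        rw [← hM]
        exact mfold_eq_init_or_mem (boards.map Prod.snd)
          (fun b => boardTime (buildPos draws) (draws.length : Int) b) (draws.length : Int)
      have hex' : ∃ b ∈ boards.map Prod.snd,
          boardTime (buildPos draws) (draws.length : Int) b = M := by
        rcases hex with h | ⟨b, hb, hbe⟩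
        · exfalso; omega
        · exact ⟨b, hb, hbe.symm⟩
      obtain ⟨bstar0, hbmem, hbeq⟩ := hex'
      have hfindsome : ∃ bs, (boards.map Prod.snd).find?
          (fun b => decide (boardTime (buildPos draws) (draws.length : Int) b ≤ M)) = some bs := by
        have hsome : ((boards.map Prod.snd).find?
            (fun b => decide (boardTime (buildPos draws) (draws.length : Int) b ≤ M))).isSome :=
          List.find?_isSome.mpr ⟨bstar0, hbmem, by simp [hbeq]⟩
        exact Option.isSome_iff_exists.mp hsome
      obtain ⟨bstar, hbstar⟩ := hfindsome
      rw [if_pos hcase, hbstar]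
      -- A's loop stops exactly at draw index M.toNat with the same board
      have hmono : ∀ (kv : Int × List (List Int)), kv ∈ boards →
          M ≤ boardTime (buildPos draws) (draws.length : Int) kv.2 := by
        intro kv hkv
        rw [← hM]
        exact mfold_le_elem (boards.map Prod.snd)
          (fun b => boardTime (buildPos draws) (draws.length : Int) b)
          (draws.length : Int) kv.2 (List.mem_map_of_mem hkv)
      have hfnoneA : ∀ k : Nat, k < M.toNat →
          part1Find (PySem.Dict.mk boards) (draws.take (k + 1)) = none := by
        intro k hk
        rw [part1Find_eq boards hnd]
        rw [List.find?_eq_none.mpr ?_]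
        · rfl
        · intro kv hkv hchk
          have hBT := (check_iff_boardTime draws kv.2 (hallrag kv hkv) k (by omega)).mp hchk
          have := hmono kv hkv
          omega
      have hfW : part1Find (PySem.Dict.mk boards) (draws.take (M.toNat + 1)) = some bstar := by
        rw [part1Find_eq boards hnd]
        have hcg : boards.find? (fun kv => checkRowColumn kv.2 (draws.take (M.toNat + 1)))
            = boards.find? (fun kv =>
                decide (boardTime (buildPos draws) (draws.length : Int) kv.2 ≤ M)) := by
          apply find?_congr_mem
          intro kv hkv
          rw [Bool.eq_iff_iff, decide_eq_true_iff]
          rw [check_iff_boardTime draws kv.2 (hallrag kv hkv) M.toNat hWlt, hMcast]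
        rw [hcg]
        have hmapfind := List.find?_map (f := Prod.snd) (l := boards)
          (p := fun b => decide (boardTime (buildPos draws) (draws.length : Int) b ≤ M))
        simp only [Function.comp_def] at hmapfind
        rw [hmapfind] at hbstar
        cases hfd : boards.find? (fun kv =>
            decide (boardTime (buildPos draws) (draws.length : Int) kv.2 ≤ M)) with
        | none => rw [hfd] at hbstar; simp at hbstar
        | some kv =>
          rw [hfd] at hbstar
          simp only [Option.map_some, Option.some_inj] at hbstar
          simp [hbstar]
      rw [loop_reach (PySem.Dict.mk boards) draws M.toNat bstar hWlt hfnoneA hfW]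
      dsimp only
      congr 1
      · apply congrArg List.sum
        apply List.map_congr_left
        intro row _
        apply congrArg List.sum
        apply List.filter_congr
        intro e _
        rw [Bool.eq_iff_iff, Bool.not_eq_true', decide_eq_true_iff]
        have hmem := pg_le_iff draws M.toNat hWlt e
        rw [hMcast] at hmem
        constructor
        · intro h
          by_contra hgt
          have hle : (buildPos draws).getD e (draws.length : Int) ≤ M := by omega
          have hmm := hmem.mp hle
          rw [← List.contains_iff_mem, h] at hmm
          cases hmm
        · intro h
          rw [← Bool.not_eq_true, List.contains_iff_mem]
          intro hmm
          have := hmem.mpr hmm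
          omega
      · have hlen : (draws.take (M.toNat + 1)).length = M.toNat + 1 := by
          rw [List.length_take]; omega
        rw [PySem.List.pyGetD_neg_ofNat (draws.take (M.toNat + 1)) 1 0 (by omega)
          (by rw [hlen]; omega)]
        conv_rhs => rw [← hMcast, PySem.List.pyGetD_natCast]
        rw [List.getD_eq_getElem draws 0 (by omega)]
        simp only [hlen, Nat.add_sub_cancel]
        rw [List.getElem_take]
    · rw [if_neg hcase]
      have hfnone : ∀ j : Nat, j < draws.length →
          part1Find (PySem.Dict.mk boards) ([] ++ draws.take (j + 1)) = none := by
        intro j hj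
        rw [List.nil_append, part1Find_eq boards hnd]
        rw [List.find?_eq_none.mpr ?_]
        · rfl
        · intro kv hkv hchk
          have hBT := (check_iff_boardTime draws kv.2 (hallrag kv hkv) j hj).mp hchk
          have hge : (boards.map Prod.snd).foldl
                (fun w b => min w (boardTime (buildPos draws) (draws.length : Int) b))
                (draws.length : Int) ≤ boardTime (buildPos draws) (draws.length : Int) kv.2 :=
            mfold_le_elem (boards.map Prod.snd)
              (fun b => boardTime (buildPos draws) (draws.length : Int) b)
              (draws.length : Int) kv.2 (List.mem_map_of_mem hkv)
          have hj' : (j : Int) < (draws.length : Int) := by exact_mod_cast hj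
          omega
      rw [loop_none (PySem.Dict.mk boards) draws [] hfnone]
      simp
  · -- a short row exists: Pre_ forces a first-draw win before any short row is reached
    push Not at hallrag
    obtain ⟨kv0, hkv0, row0, hrow0, hlen0⟩ := hallrag
    have hwin : ∃ kv ∈ boards, instWin kv.2 draws.headI := by
      obtain ⟨i0, hi0, heq⟩ := List.mem_iff_getElem.mp hkv0
      rcases hcov i0 hi0 ⟨row0, by rw [heq]; exact hrow0, by omega⟩ with h | ⟨kv, hkv, hw⟩
      · exact ⟨boards[i0], List.getElem_mem hi0, h⟩
      · exact ⟨kv, List.mem_of_mem_take hkv, hw⟩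
    obtain ⟨kvW, hkvW, hW⟩ := hwin
    have hlenpos : 0 < draws.length := List.length_pos_iff.mpr hne
    have hlen0' : (0:Int) < (draws.length : Int) := by exact_mod_cast hlenpos
    have hM0 : (boards.map Prod.snd).foldl
        (fun w b => min w (boardTime (buildPos draws) (draws.length : Int) b))
        (draws.length : Int) = 0 := by
      apply le_antisymm
      · have h1 : (boards.map Prod.snd).foldl
            (fun w b => min w (boardTime (buildPos draws) (draws.length : Int) b))
            (draws.length : Int) ≤ boardTime (buildPos draws) (draws.length : Int) kvW.2 :=
          mfold_le_elem (boards.map Prod.snd)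
            (fun b => boardTime (buildPos draws) (draws.length : Int) b)
            (draws.length : Int) kvW.2 (List.mem_map_of_mem hkvW)
        exact le_trans h1 (instWin_boardTime draws hne kvW.2 hW)
      · refine (le_foldl_min_iff _ _ _ _).mpr ⟨by positivity, fun b _ => ?_⟩
        exact boardTime_nonneg _ _ (by positivity) b
    rw [hM0, if_pos hlen0']
    have hq : ∃ bs, (boards.map Prod.snd).find?
        (fun b => decide (boardTime (buildPos draws) (draws.length : Int) b ≤ 0)) = some bs :=
      Option.isSome_iff_exists.mp (List.find?_isSome.mpr ⟨kvW.2, List.mem_map_of_mem hkvW,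
        by simpa using instWin_boardTime draws hne kvW.2 hW⟩)
    obtain ⟨bstar, hbstar⟩ := hq
    rw [hbstar]
    have hfW : part1Find (PySem.Dict.mk boards) (draws.take (0 + 1)) = some bstar := by
      rw [part1Find_eq boards hnd]
      have hcg : boards.find? (fun kv => checkRowColumn kv.2 (draws.take (0 + 1)))
          = boards.find? (fun kv =>
              decide (boardTime (buildPos draws) (draws.length : Int) kv.2 ≤ 0)) := by
        apply find?_eq_cover
        · intro kv _ hqkv
          rw [decide_eq_true_iff] at hqkv
          exact boardTime_check draws hne kv.2 hqkv
        · intro i hi hp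
          by_cases hrag : ∃ row ∈ boards[i].2, row.length < 5
          · rcases hcov i hi hrag with h | ⟨kv, hkv, hw⟩
            · exact Or.inl (by simpa using instWin_boardTime draws hne _ h)
            · exact Or.inr ⟨kv, hkv, by simpa using instWin_boardTime draws hne _ hw⟩
          · push Not at hrag
            refine Or.inl ?_
            rw [decide_eq_true_iff]
            have hc := (check_iff_boardTime draws boards[i].2
              (fun row hr => hrag row hr) 0 hlenpos).mp hp
            simpa using hc
      rw [hcg]
      have hmapfind := List.find?_map (f := Prod.snd) (l := boards)
        (p := fun b => decide (boardTime (buildPos draws) (draws.length : Int) b ≤ 0))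
      simp only [Function.comp_def] at hmapfind
      rw [hmapfind] at hbstar
      cases hfd : boards.find? (fun kv =>
          decide (boardTime (buildPos draws) (draws.length : Int) kv.2 ≤ 0)) with
      | none => rw [hfd] at hbstar; simp at hbstar
      | some kv =>
        rw [hfd] at hbstar
        simp only [Option.map_some, Option.some_inj] at hbstar
        simp [hbstar]
    rw [loop_reach (PySem.Dict.mk boards) draws 0 bstar hlenpos
      (fun k hk => absurd hk (Nat.not_lt_zero k)) hfW]
    dsimp only
    have h01 : draws.take (0 + 1) = draws.take 1 := rfl
    rw [h01]
    congr 1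
    · apply congrArg List.sum
      apply List.map_congr_left
      intro row _
      apply congrArg List.sum
      apply List.filter_congr
      intro e _
      rw [Bool.eq_iff_iff, Bool.not_eq_true', decide_eq_true_iff]
      have hpz := pg_zero_iff draws hne e
      constructor
      · intro h
        by_contra hgt
        have hle : (buildPos draws).getD e (draws.length : Int) ≤ 0 := by omega
        have hmm := (mem_take_one draws hne e).mpr (hpz.mp hle)
        rw [← List.contains_iff_mem, h] at hmm
        cases hmm
      · intro h
        rw [← Bool.not_eq_true, List.contains_iff_mem]
        intro hmm
        have := hpz.mpr ((mem_take_one draws hne e).mp hmm)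
        omega
    · have hlen1 : (draws.take 1).length = 1 := by rw [List.length_take]; omega
      rw [PySem.List.pyGetD_neg_ofNat (draws.take 1) 1 0 (by omega) (by rw [hlen1])]
      rw [PySem.List.pyGetD_zero]
      rw [List.getD_eq_getElem draws 0 (by omega)]
      simp only [hlen1, Nat.sub_self]
      rw [List.getElem_take]
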